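-- pv_equiv track=rewrite | github.com/pjoshi08/DSA | src/main/java/org/example/arrays/CountAlmostEqPairsI.py | check
-- ===== SOURCE A (Python) =====
-- def check(num1, num2) -> bool:
--     num1 = str(num1)
--     num2 = str(num2)
--
--     # add leading 0 for shorter num
--     while len(num1) < len(num2):
--         num1 = "0" + num1
--     while len(num1) > len(num2):
--         num2 = "0" + num2
--
--     diff_count = 0
--     first_idx, second_idx = -1, -1
--
--     # capture indices where the two nums differ
--     for i in range(len(num1)):
--         if num1[i] != num2[i]:
--             diff_count += 1
--             if diff_count == 1:
--                 first_idx = i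
--             elif diff_count == 2:
--                 second_idx = i
--             else:  # this condition means diff_count > 2, i.e. nums cannot be made equal
--                 return False
--
--     # if diff_count == 2, see if swapping values at indices makes two nums equal
--     if diff_count == 2:
--         num1 = list(num1)
--         num1[first_idx], num1[second_idx] = num1[second_idx], num1[first_idx]
--         num1 = ''.join(num1)
--     return num1 == num2
-- ===== SOURCE B (Python) =====
-- def _swapped(s, i, j):
--     t = list(s)
--     t[i], t[j] = t[j], t[i]
--     return "".join(t)
--
--
-- def check(num1, num2) -> bool:
--     s1, s2 = str(num1), str(num2)
--     L = max(len(s1), len(s2))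
--     s1 = "0" * (L - len(s1)) + s1
--     s2 = "0" * (L - len(s2)) + s2
--     if s1 == s2:
--         return True
--     return any(_swapped(s1, i, j) == s2
--                for i in range(L) for j in range(i + 1, L))
-- ===== Notes on version B (the rewrite author's own statement) =====
-- stated objective: alternative
-- what changed: B is a generate-and-test brute force: after padding to equal length it tries every swap of two positions (i,j) in the first string and returns True iff the strings are already equal or some swapped copy equals the second string, instead of A's single mismatch-counting scan with first/second index bookkeeping and a targeted swap.
import Mathlib
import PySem

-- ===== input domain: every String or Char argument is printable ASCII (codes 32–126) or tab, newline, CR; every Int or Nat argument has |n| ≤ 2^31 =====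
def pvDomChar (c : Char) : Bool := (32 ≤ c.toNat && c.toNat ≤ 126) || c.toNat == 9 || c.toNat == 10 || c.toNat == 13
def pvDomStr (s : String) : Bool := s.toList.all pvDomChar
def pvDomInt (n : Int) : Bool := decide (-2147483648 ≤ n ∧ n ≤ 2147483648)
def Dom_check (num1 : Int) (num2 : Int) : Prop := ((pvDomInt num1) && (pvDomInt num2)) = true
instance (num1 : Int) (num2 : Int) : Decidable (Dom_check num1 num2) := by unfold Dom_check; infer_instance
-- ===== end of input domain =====

-- B replaces A's mismatch-counting scan and targeted swap with a generate-and-test brute force over all swap pairs (objective: alternative).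

-- ===== PORT A =====
-- A's 'while len(a) < len(b): a = "0" + a' padding loop (used for both directions)
def padShorter (a : List Char) (b : List Char) : List Char :=
  if a.length < b.length then padShorter ('0' :: a) b else a
termination_by b.length - a.length

-- A's 'for i in range(len(num1))' scan; 'none' = the early 'return False'
def loopA (s1 s2 : List Char) (i : Nat) (dc fi si : Int) : Option (Int × Int × Int) :=
  if i < s1.length then
    if s1.getD i ' ' != s2.getD i ' ' then
      if dc + 1 = 1 then loopA s1 s2 (i + 1) (dc + 1) (i : Int) si
      else if dc + 1 = 2 then loopA s1 s2 (i + 1) (dc + 1) fi (i : Int)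
      else none
    else loopA s1 s2 (i + 1) dc fi si
  else some (dc, fi, si)
termination_by s1.length - i

-- 'num1[first_idx], num1[second_idx] = num1[second_idx], num1[first_idx]' (tuple swap on a list)
def swapA (s : List Char) (fi si : Int) : List Char :=
  (s.set fi.toNat (s.getD si.toNat ' ')).set si.toNat (s.getD fi.toNat ' ')

def check (num1 : Int) (num2 : Int) : Bool :=
  let n1 := (PySem.Int.toStr num1).toList
  let n2 := (PySem.Int.toStr num2).toList
  let n1 := padShorter n1 n2
  let n2 := padShorter n2 n1
  match loopA n1 n2 0 0 (-1) (-1) with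
  | none => false
  | some (dc, fi, si) =>
    if dc = 2 then swapA n1 fi si == n2 else n1 == n2

-- ===== PORT B =====
-- Source B's _swapped(s, i, j): copy to a list, tuple-swap positions i and j, rejoin
def swapB (s : List Char) (i j : Nat) : List Char :=
  (s.set i (s.getD j ' ')).set j (s.getD i ' ')

def check_alt (num1 : Int) (num2 : Int) : Bool :=
  let s1 := (PySem.Int.toStr num1).toList
  let s2 := (PySem.Int.toStr num2).toList
  let L := max s1.length s2.length
  let t1 := List.replicate (L - s1.length) '0' ++ s1
  let t2 := List.replicate (L - s2.length) '0' ++ s2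
  if t1 == t2 then true
  else (List.range L).any fun i =>
    (List.range' (i + 1) (L - (i + 1))).any fun j => swapB t1 i j == t2

-- ===== PRECONDITION & SPEC =====
def Spec_check (num1 : Int) (num2 : Int) (out : Bool) : Prop := out = check_alt num1 num2
instance (num1 : Int) (num2 : Int) (out : Bool) : Decidable (Spec_check num1 num2 out) := by unfold Spec_check; infer_instance

-- ===== CLAIM (what is proved, stated in full; the proofs are below) =====
def Claim_equal_check : Prop := ∀ (num1 : Int) (num2 : Int), Dom_check num1 num2 → Spec_check num1 num2 (check num1 num2)

-- ===== LEMMAS AND PROOFS =====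

lemma padShorter_eq (a b : List Char) :
    padShorter a b = List.replicate (b.length - a.length) '0' ++ a := by
  by_cases h : a.length < b.length
  · rw [padShorter, if_pos h, padShorter_eq ('0' :: a) b]
    have : b.length - a.length = (b.length - (a.length + 1)) + 1 := by omega
    rw [this, List.replicate_succ']
    simp
  · rw [padShorter, if_neg h]
    have : b.length - a.length = 0 := by omega
    simp [this]
termination_by b.length - a.length

-- the remaining differing indices, scanning from position i
def diffsFrom (s1 s2 : List Char) (i : Nat) : List Nat :=
  (List.range' i (s1.length - i)).filter (fun k => s1.getD k ' ' != s2.getD k ' ')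

lemma diffsFrom_step (s1 s2 : List Char) (i : Nat) (h : i < s1.length) :
    diffsFrom s1 s2 i =
      if s1.getD i ' ' != s2.getD i ' ' then i :: diffsFrom s1 s2 (i + 1)
      else diffsFrom s1 s2 (i + 1) := by
  unfold diffsFrom
  have : s1.length - i = (s1.length - (i + 1)) + 1 := by omega
  rw [this, List.range'_succ, List.filter_cons]

lemma diffsFrom_end (s1 s2 : List Char) (i : Nat) (h : ¬ i < s1.length) :
    diffsFrom s1 s2 i = [] := by
  unfold diffsFrom
  have : s1.length - i = 0 := by omega
  simp [this]

lemma loopA_two (s1 s2 : List Char) (i : Nat) (fi si : Int) :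
    loopA s1 s2 i 2 fi si =
      if diffsFrom s1 s2 i = [] then some (2, fi, si) else none := by
  by_cases h : i < s1.length
  · rw [loopA, if_pos h, diffsFrom_step s1 s2 i h]
    by_cases hp : (s1.getD i ' ' != s2.getD i ' ') = true
    · rw [if_pos hp, if_pos hp]
      norm_num
      exact fun hx => (List.cons_ne_nil _ _ hx).elim
    · rw [if_neg hp, if_neg hp]
      rw [loopA_two s1 s2 (i+1) fi si]
  · rw [loopA, if_neg h, diffsFrom_end s1 s2 i h]; simp
termination_by s1.length - i

lemma loopA_one (s1 s2 : List Char) (i : Nat) (fi si : Int) :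
    loopA s1 s2 i 1 fi si =
      match diffsFrom s1 s2 i with
      | [] => some (1, fi, si)
      | [b] => some (2, fi, (b : Int))
      | _ => none := by
  by_cases h : i < s1.length
  · rw [loopA, if_pos h, diffsFrom_step s1 s2 i h]
    by_cases hp : (s1.getD i ' ' != s2.getD i ' ') = true
    · rw [if_pos hp, if_pos hp]
      norm_num
      rw [loopA_two s1 s2 (i+1) fi (i : Int)]
      rcases hd : diffsFrom s1 s2 (i+1) with _ | ⟨b, rest⟩ <;> simp
    · rw [if_neg hp, if_neg hp]
      rw [loopA_one s1 s2 (i+1) fi si]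
  · rw [loopA, if_neg h, diffsFrom_end s1 s2 i h]
termination_by s1.length - i

lemma loopA_zero (s1 s2 : List Char) (i : Nat) (fi si : Int) :
    loopA s1 s2 i 0 fi si =
      match diffsFrom s1 s2 i with
      | [] => some (0, fi, si)
      | [a] => some (1, (a : Int), si)
      | [a, b] => some (2, (a : Int), (b : Int))
      | _ => none := by
  by_cases h : i < s1.length
  · rw [loopA, if_pos h, diffsFrom_step s1 s2 i h]
    by_cases hp : (s1.getD i ' ' != s2.getD i ' ') = true
    · rw [if_pos hp, if_pos hp]
      norm_num
      rw [loopA_one s1 s2 (i+1) (i : Int) si]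
      rcases hd : diffsFrom s1 s2 (i+1) with _ | ⟨b, _ | ⟨c, rest⟩⟩ <;> simp
    · rw [if_neg hp, if_neg hp]
      rw [loopA_zero s1 s2 (i+1) fi si]
  · rw [loopA, if_neg h, diffsFrom_end s1 s2 i h]
termination_by s1.length - i

-- positions outside the diff list agree; an empty diff list means equal lists
lemma eq_of_filter_nil (t1 t2 : List Char) (hlen : t1.length = t2.length)
    (hf : (List.range t1.length).filter (fun k => t1.getD k ' ' != t2.getD k ' ') = []) :
    t1 = t2 := by
  apply List.ext_getElem hlen
  intro i h1 h2
  have hi : i ∈ List.range t1.length := List.mem_range.mpr h1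
  have := (List.filter_eq_nil_iff.mp hf) i hi
  simp only [bne_iff_ne, not_not] at this
  rwa [List.getD_eq_getElem t1 ' ' h1, List.getD_eq_getElem t2 ' ' h2] at this

lemma ne_of_mem_filter (t1 t2 : List Char) (a : Nat)
    (ha : a ∈ (List.range t1.length).filter (fun k => t1.getD k ' ' != t2.getD k ' ')) :
    t1 ≠ t2 := by
  intro he
  rcases List.mem_filter.mp ha with ⟨_, hp⟩
  simp [he] at hp

-- a swap only changes positions i and j
lemma swap_outside (t : List Char) (i j k : Nat) (hki : k ≠ i) (hkj : k ≠ j) :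
    (swapB t i j).getD k ' ' = t.getD k ' ' := by
  unfold swapB
  by_cases hk : k < t.length
  · rw [List.getD_eq_getElem _ ' ' (by simpa using hk), List.getD_eq_getElem t ' ' hk,
      List.getElem_set, List.getElem_set, if_neg (fun h => hkj h.symm), if_neg (fun h => hki h.symm)]
  · rw [List.getD_eq_default _ ' ' (by simpa using hk), List.getD_eq_default t ' ' (by omega)]

lemma swap_at_i (t : List Char) (i j : Nat) (hij : i ≠ j) (hi : i < t.length) :
    (swapB t i j).getD i ' ' = t.getD j ' ' := by
  unfold swapB
  rw [List.getD_eq_getElem _ ' ' (by simpa using hi),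
    List.getElem_set, if_neg (fun h => hij h.symm), List.getElem_set, if_pos rfl]

lemma swap_at_j (t : List Char) (i j : Nat) (hj : j < t.length) :
    (swapB t i j).getD j ' ' = t.getD i ' ' := by
  unfold swapB
  rw [List.getD_eq_getElem _ ' ' (by simpa using hj), List.getElem_set, if_pos rfl]

-- the diff-list characterisation of membership
lemma mem_diff_iff (t1 t2 : List Char) (k : Nat) :
    (k ∈ (List.range t1.length).filter (fun k => t1.getD k ' ' != t2.getD k ' ')) ↔
      (k < t1.length ∧ t1.getD k ' ' ≠ t2.getD k ' ') := by
  rw [List.mem_filter, List.mem_range, bne_iff_ne]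

-- if swapping (i,j) of t1 gives t2 then every diff position is i or j
lemma diff_mem_swap (t1 t2 : List Char) (i j a : Nat)
    (he : swapB t1 i j = t2)
    (ha : a ∈ (List.range t1.length).filter (fun k => t1.getD k ' ' != t2.getD k ' ')) :
    a = i ∨ a = j := by
  rcases (mem_diff_iff t1 t2 a).mp ha with ⟨_, hne⟩
  by_contra h
  exact hne (by rw [← he, swap_outside t1 i j a (fun h1 => h (Or.inl h1)) (fun h2 => h (Or.inr h2))])

-- the diff list is sorted strictly increasing and has no duplicates
lemma diff_pairwise (t1 t2 : List Char) :
    ((List.range t1.length).filter (fun k => t1.getD k ' ' != t2.getD k ' ')).Pairwise (· < ·) := by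
  have h2 : (List.range t1.length).Pairwise (· < ·) := List.pairwise_lt_range
  exact h2.sublist List.filter_sublist

-- A's whole post-padding computation equals B's, for equal-length lists
lemma core_eq (t1 t2 : List Char) (hlen : t1.length = t2.length) :
    (match loopA t1 t2 0 0 (-1) (-1) with
     | none => false
     | some (dc, fi, si) => if dc = 2 then swapA t1 fi si == t2 else t1 == t2) =
    (if t1 == t2 then true
     else (List.range t1.length).any fun i =>
       (List.range' (i + 1) (t1.length - (i + 1))).any fun j => swapB t1 i j == t2) := by
  have hd0 : diffsFrom t1 t2 0 = (List.range t1.length).filter (fun k => t1.getD k ' ' != t2.getD k ' ') := by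
    unfold diffsFrom
    rw [List.range_eq_range']
    simp
  rw [loopA_zero, hd0]
  -- B's nested any as an existential
  have hany : (((List.range t1.length).any fun i =>
      (List.range' (i + 1) (t1.length - (i + 1))).any fun j => swapB t1 i j == t2) = true) ↔
      ∃ i j, i < j ∧ j < t1.length ∧ swapB t1 i j = t2 := by
    simp only [List.any_eq_true, List.mem_range, List.mem_range'_1, beq_iff_eq]
    constructor
    · rintro ⟨i, hi, j, ⟨hj1, hj2⟩, he⟩
      exact ⟨i, j, by omega, by omega, he⟩
    · rintro ⟨i, j, hij, hjl, he⟩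
      exact ⟨i, by omega, j, ⟨by omega, by omega⟩, he⟩
  rcases hf : (List.range t1.length).filter (fun k => t1.getD k ' ' != t2.getD k ' ') with _ | ⟨a, _ | ⟨b, _ | ⟨c, rest⟩⟩⟩
  · simp [eq_of_filter_nil t1 t2 hlen hf]
  · -- exactly one diff: A returns t1 == t2 (false); B finds no working swap
    have hne := ne_of_mem_filter t1 t2 a (hf ▸ List.mem_cons_self)
    rw [if_neg (by simpa using hne)]
    simp only [show ¬ ((1:Int) = 2) by norm_num, if_false]
    rw [show (t1 == t2) = false by simpa using hne]
    symm
    rw [Bool.eq_false_iff]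
    intro hA
    rcases hany.mp hA with ⟨i, j, hij, hjl, he⟩
    have hil : i < t1.length := by omega
    have ha := (mem_diff_iff t1 t2 a).mp (hf ▸ List.mem_cons_self)
    have hothers : ∀ k, k < t1.length → k ≠ a → t1.getD k ' ' = t2.getD k ' ' := by
      intro k hk hka
      by_contra hkne
      have := (mem_diff_iff t1 t2 k).mpr ⟨hk, hkne⟩
      rw [hf] at this
      simp [hka] at this
    have h2i : t2.getD i ' ' = t1.getD j ' ' := by rw [← he, swap_at_i t1 i j (by omega) hil]
    have h2j : t2.getD j ' ' = t1.getD i ' ' := by rw [← he, swap_at_j t1 i j hjl]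
    rcases diff_mem_swap t1 t2 i j a he (hf ▸ List.mem_cons_self) with rfl | rfl
    · have hj' : t1.getD j ' ' = t2.getD j ' ' := hothers j hjl (by omega)
      exact ha.2 (by rw [h2i, hj', h2j])
    · have hi' : t1.getD i ' ' = t2.getD i ' ' := hothers i hil (by omega)
      exact ha.2 (by rw [h2j, hi', h2i])
  · -- exactly two diffs a < b: A swaps (a,b); B succeeds iff that very swap works
    have hp := hf ▸ diff_pairwise t1 t2
    have hab : a < b := by
      rcases List.pairwise_cons.mp hp with ⟨h1, _⟩
      exact h1 b List.mem_cons_self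
    have hamem := hf ▸ (List.mem_cons_self : a ∈ a :: [b])
    have hbmem := hf ▸ (show b ∈ a :: [b] by simp)
    have hbl : b < t1.length := ((mem_diff_iff t1 t2 b).mp hbmem).1
    have hne := ne_of_mem_filter t1 t2 a hamem
    show (if (2:Int) = 2 then swapA t1 ((a : Nat) : Int) ((b : Nat) : Int) == t2 else t1 == t2) =
      (if (t1 == t2) = true then true
       else (List.range t1.length).any fun i =>
         (List.range' (i + 1) (t1.length - (i + 1))).any fun j => swapB t1 i j == t2)
    rw [if_pos rfl, if_neg (by simpa using hne)]
    have hswap : swapA t1 (a : Int) (b : Int) = swapB t1 a b := by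
      simp [swapA, swapB]
    rw [hswap, Bool.eq_iff_iff, beq_iff_eq, hany]
    constructor
    · intro he
      exact ⟨a, b, hab, hbl, he⟩
    · rintro ⟨i, j, hij, hjl, he⟩
      rcases diff_mem_swap t1 t2 i j a he hamem with h1 | h1 <;>
        rcases diff_mem_swap t1 t2 i j b he hbmem with h2 | h2 <;>
        [skip; skip; skip; skip] <;> first
      | (have : a = i ∧ b = j := by omega
         rcases this with ⟨rfl, rfl⟩; exact he)
      | omega
  · -- three or more diffs: A returns false; B finds no working swap
    have hne := ne_of_mem_filter t1 t2 a (hf ▸ List.mem_cons_self)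
    have hB : ((List.range t1.length).any fun i =>
        (List.range' (i + 1) (t1.length - (i + 1))).any fun j => swapB t1 i j == t2) = false := by
      rw [Bool.eq_false_iff]
      intro hA
      rcases hany.mp hA with ⟨i, j, hij, hjl, he⟩
      have hp := hf ▸ diff_pairwise t1 t2
      have hab : a < b ∧ a < c ∧ b < c := by
        rcases List.pairwise_cons.mp hp with ⟨h1, h2⟩
        rcases List.pairwise_cons.mp h2 with ⟨h3, _⟩
        exact ⟨h1 b (by simp), h1 c (by simp), h3 c (by simp)⟩
      have hma : a = i ∨ a = j := diff_mem_swap t1 t2 i j a he (hf ▸ List.mem_cons_self)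
      have hmb : b = i ∨ b = j := diff_mem_swap t1 t2 i j b he (hf ▸ (by simp))
      have hmc : c = i ∨ c = j := diff_mem_swap t1 t2 i j c he (hf ▸ (by simp))
      omega
    rw [if_neg (by simpa using hne), hB]

-- ===== VERDICT (by name: the statement is the Claim_ definition above) =====
theorem check_spec : Claim_equal_check := by
  intro num1 num2 _
  unfold Spec_check check check_alt
  simp only [padShorter_eq]
  set a1 := (PySem.Int.toStr num1).toList with ha1
  set a2 := (PySem.Int.toStr num2).toList with ha2
  have e1 : a2.length - a1.length = max a1.length a2.length - a1.length := by omega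
  rw [e1]
  have e2 : (List.replicate (max a1.length a2.length - a1.length) '0' ++ a1).length - a2.length =
      max a1.length a2.length - a2.length := by simp
  rw [e2]
  set t1 := List.replicate (max a1.length a2.length - a1.length) '0' ++ a1 with ht1
  set t2 := List.replicate (max a1.length a2.length - a2.length) '0' ++ a2 with ht2
  have hl1 : t1.length = max a1.length a2.length := by rw [ht1]; simp
  have hl2 : t2.length = max a1.length a2.length := by rw [ht2]; simp
  rw [← hl1]
  exact core_eq t1 t2 (by omega)
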